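-- pv_equiv track=rewrite | github.com/SimeonChifligarov/algo-lab | 22_bit-manipulation/bitmask_subsets.py | generate_subsets_of_size
-- ===== SOURCE A (Python) =====
-- from typing import Iterable, List, Sequence, Tuple
--
-- def mask_to_subset(items: Sequence[str], mask: int) -> List[str]:
--     """
--     Convert a mask into the corresponding subset of items.
--
--     Args:
--         items: sequence of items
--         mask: subset mask
--
--     Returns:
--         List of selected items
--     """
--     if mask < 0:
--         raise ValueError("mask must be non-negative")
--
--     subset: List[str] = []
--
--     for i, item in enumerate(items):
--         if (mask >> i) & 1:
--             subset.append(item)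
--
--     return subset
--
-- def generate_subsets_of_size(items: Sequence[str], k: int) -> List[List[str]]:
--     """
--     Generate all subsets of exactly size k.
--
--     Args:
--         items: sequence of items
--         k: desired subset size
--
--     Returns:
--         List of subsets whose size is exactly k
--     """
--     if k < 0:
--         raise ValueError("k must be non-negative")
--
--     subsets: List[List[str]] = []
--     n = len(items)
--
--     for mask in range(1 << n):
--         if mask.bit_count() == k:
--             subsets.append(mask_to_subset(items, mask))
--
--     return subsets
-- ===== SOURCE B (Python) =====
-- from typing import List, Sequence
--
-- def generate_subsets_of_size(items: Sequence[str], k: int) -> List[List[str]]: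
--     """Size-k subsets in increasing-bitmask (colex) order via Pascal-style recursion:
--     the size-kk subsets of items[:m] are those avoiding items[m-1] followed by those
--     containing it.  Memoised, so the work is proportional to the output, not to 2^n."""
--     if k < 0:
--         raise ValueError("k must be non-negative")
--
--     memo = {}
--
--     def colex(m: int, kk: int) -> List[List[str]]:
--         if kk == 0:
--             return [[]]
--         if m < kk:
--             return []
--         key = (m, kk)
--         if key not in memo:
--             memo[key] = colex(m - 1, kk) + [s + [items[m - 1]] for s in colex(m - 1, kk - 1)]
--         return memo[key]
--
--     return colex(len(items), k)
-- ===== Notes on version B (the rewrite author's own statement) =====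
-- stated objective: faster
-- what changed: B replaces A's scan of all 2^n bitmasks filtered by popcount with a memoised Pascal-style recursion that builds exactly the size-k subsets directly, in the same increasing-mask (colex) order; intended as asymptotically faster (work proportional to the output instead of 2^n), measured 4.12x at the largest size where both finish (n=16; at n=64 A times out, and on some k the output is itself too large for any implementation to return).
import Mathlib
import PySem

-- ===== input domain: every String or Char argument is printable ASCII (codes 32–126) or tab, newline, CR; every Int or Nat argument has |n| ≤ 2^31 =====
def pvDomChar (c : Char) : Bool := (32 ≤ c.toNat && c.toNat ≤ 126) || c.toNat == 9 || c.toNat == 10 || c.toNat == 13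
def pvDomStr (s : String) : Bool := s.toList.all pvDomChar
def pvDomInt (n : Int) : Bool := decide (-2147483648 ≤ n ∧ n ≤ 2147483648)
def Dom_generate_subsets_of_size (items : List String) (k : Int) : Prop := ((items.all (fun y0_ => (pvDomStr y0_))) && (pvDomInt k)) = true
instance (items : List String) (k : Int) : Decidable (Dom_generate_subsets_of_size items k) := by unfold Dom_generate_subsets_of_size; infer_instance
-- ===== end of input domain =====

-- B generates the size-k subsets directly by Pascal-style recursion (colex order) instead of
-- scanning all 2^n masks and filtering by popcount.

-- ===== PORT A =====
def mask_to_subset (items : List String) (mask : Int) : List String :=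
  if mask < 0 then []   -- Python raises ValueError here; unreachable from generate_subsets_of_size (its masks are ≥ 0)
  else (PySem.List.enumerate items).foldl
    (fun subset p => if PySem.Int.band (mask >>> p.1.toNat) 1 = 1 then subset ++ [p.2] else subset) []

def generate_subsets_of_size (items : List String) (k : Int) : List (List String) :=
  if k < 0 then []      -- Python raises ValueError here; excluded by Pre_
  else (PySem.List.pyRange 0 ((1 : Int) <<< items.length) 1).foldl
    (fun subsets mask =>
      if (PySem.Int.bitCount mask : Int) = k then subsets ++ [mask_to_subset items mask] else subsets) []

-- ===== PORT B =====
-- size-kk subsets of items[:m], in colex order; items.getD (m-1) "" is Python's items[m-1]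
-- (exact: the index is always in range on the calls made).
def colex (items : List String) (m kk : Nat) : List (List String) :=
  if kk = 0 then [[]]
  else if m < kk then []
  else colex items (m-1) kk ++ (colex items (m-1) (kk-1)).map (fun s => s ++ [items.getD (m-1) ""])
termination_by m
decreasing_by all_goals omega

def generate_subsets_of_size_alt (items : List String) (k : Int) : List (List String) :=
  if k < 0 then []      -- raise ValueError, same as A
  else colex items items.length k.toNat

-- ===== PRECONDITION & SPEC =====
-- Pre_ excludes exactly k < 0, where the Python A (and B) raises ValueError.
def Pre_generate_subsets_of_size (items : List String) (k : Int) : Prop := 0 ≤ k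
instance (items : List String) (k : Int) : Decidable (Pre_generate_subsets_of_size items k) := by unfold Pre_generate_subsets_of_size; infer_instance
def pvWitness_generate_subsets_of_size : List String × Int := (["a", "b", "c"], 2)

def Spec_generate_subsets_of_size (items : List String) (k : Int) (out : List (List String)) : Prop := out = generate_subsets_of_size_alt items k
instance (items : List String) (k : Int) (out : List (List String)) : Decidable (Spec_generate_subsets_of_size items k out) := by unfold Spec_generate_subsets_of_size; infer_instance

-- ===== CLAIM (what is proved, stated in full; the proofs are below) =====
def Claim_equal_generate_subsets_of_size : Prop := ∀ (items : List String) (k : Int), Dom_generate_subsets_of_size items k → Pre_generate_subsets_of_size items k → Spec_generate_subsets_of_size items k (generate_subsets_of_size items k)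

-- ===== LEMMAS AND PROOFS =====

-- the subset a (nonnegative, Nat-level) mask selects from items — A's mask_to_subset, restated for proofs
def maskSub (items : List String) (m : Nat) : List String :=
  (((PySem.List.enumerate items).filter (fun p => m.testBit p.1.toNat)).map (·.2))

theorem bit_test (m j : Nat) :
    (PySem.Int.band ((m : Int) >>> ((j : Nat) : Int)) 1 = 1) ↔ m.testBit j = true := by
  have h1 : (m : Int) >>> ((j : Nat) : Int) = ((m >>> j : Nat) : Int) := by simp
  have h2 : (1 : Int) = ((1 : Nat) : Int) := rfl
  rw [h1, h2, PySem.Int.band_natCast, Nat.cast_inj, Nat.testBit,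
    Nat.one_and_eq_mod_two, Nat.shiftRight_eq_div_pow, Nat.and_one_is_mod]
  simp

theorem mask_to_subset_natCast (items : List String) (m : Nat) :
    mask_to_subset items (m : Int) = maskSub items m := by
  unfold mask_to_subset maskSub
  rw [if_neg (by exact_mod_cast Int.not_lt.mpr (Int.natCast_nonneg m))]
  have h := PySem.List.foldl_append_if
    (fun p : Int × String => decide (PySem.Int.band ((m : Int) >>> ((p.1.toNat : Nat) : Int)) 1 = 1))
    (fun p : Int × String => p.2) (PySem.List.enumerate items) []
  simp only [decide_eq_true_eq] at h
  rw [h, List.nil_append]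
  congr 1
  apply List.filter_congr
  intro p _
  cases hb : m.testBit p.1.toNat with
  | false =>
    simp only [decide_eq_false_iff_not]
    intro hc
    have hcb := (bit_test m p.1.toNat).mp hc
    rw [hb] at hcb
    exact Bool.false_ne_true hcb
  | true =>
    simp only [decide_eq_true_eq]
    exact (bit_test m p.1.toNat).mpr hb

-- n.bit_count halving, valid also at 0
theorem bc_step (m : Nat) :
    PySem.Int.bitCount (m : Int) = m % 2 + PySem.Int.bitCount ((m / 2 : Nat) : Int) := by
  rcases Nat.eq_zero_or_pos m with h | h
  · subst h; decide
  · exact PySem.Int.bitCount_natCast h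

theorem bc_add_pow (n : Nat) : ∀ m : Nat, m < 2 ^ n →
    PySem.Int.bitCount ((2 ^ n + m : Nat) : Int) = PySem.Int.bitCount (m : Int) + 1 := by
  induction n with
  | zero =>
    intro m hm
    interval_cases m
    decide
  | succ n ih =>
    intro m hm
    have hp : (2 : Nat) ^ (n + 1) = 2 ^ n + 2 ^ n := by ring
    have hd : (2 ^ (n + 1) + m) / 2 = 2 ^ n + m / 2 := by omega
    have hm2 : (2 ^ (n + 1) + m) % 2 = m % 2 := by omega
    have hlt : m / 2 < 2 ^ n := by omega
    rw [bc_step (2 ^ (n + 1) + m), hd, hm2, ih _ hlt, bc_step m]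
    omega

theorem enumerate_take_idx (items : List String) (n : Nat) (p : Int × String)
    (hp : p ∈ PySem.List.enumerate (items.take n) 0) : p.1.toNat < n := by
  rcases (PySem.List.mem_enumerate_iff _ _ _).mp hp with ⟨j, hj, rfl⟩
  have := List.length_take_le n items
  simp only [zero_add]
  omega

theorem enumerate_drop_idx (items : List String) (n : Nat) (p : Int × String)
    (hp : p ∈ PySem.List.enumerate (items.drop n) (n : Int)) : n ≤ p.1.toNat := by
  rcases (PySem.List.mem_enumerate_iff _ _ _).mp hp with ⟨j, hj, rfl⟩
  simp only [Int.toNat_natCast]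
  omega

-- adding bit n (above the mask) appends items[n] to the selected subset
theorem maskSub_add_pow (items : List String) (n m : Nat)
    (hm : m < 2 ^ n) (hn : n < items.length) :
    maskSub items (2 ^ n + m) = maskSub items m ++ [items.getD n ""] := by
  have hbl : ∀ i : Nat, i < n → (2 ^ n + m).testBit i = m.testBit i := by
    intro i hi; exact Nat.testBit_two_pow_add_gt hi m
  have hmn : m.testBit n = false := Nat.testBit_lt_two_pow hm
  have hhigh : ∀ i : Nat, n < i → (2 ^ n + m).testBit i = false := by
    intro i hi
    exact Nat.testBit_lt_two_pow (by
      calc 2 ^ n + m < 2 ^ n + 2 ^ n := by omega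
      _ = 2 ^ (n + 1) := by ring
      _ ≤ 2 ^ i := Nat.pow_le_pow_right (by norm_num) (by omega))
  have hmhigh : ∀ i : Nat, n ≤ i → m.testBit i = false := by
    intro i hi
    exact Nat.testBit_lt_two_pow (lt_of_lt_of_le hm (Nat.pow_le_pow_right (by norm_num) hi))
  have hlen : (items.take n).length = n := List.length_take_of_le (le_of_lt hn)
  have hdrop : items.drop n = items[n] :: items.drop (n + 1) := List.drop_eq_getElem_cons hn
  have key : PySem.List.enumerate items 0 =
      PySem.List.enumerate (items.take n) 0 ++
        ((n : Int), items[n]) :: PySem.List.enumerate (items.drop (n + 1)) ((n : Int) + 1) := by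
    conv_lhs => rw [← List.take_append_drop n items]
    rw [PySem.List.enumerate_append, hdrop, PySem.List.enumerate_cons, hlen]
    simp only [zero_add]
  have htail : ∀ M : Nat, (∀ i : Nat, n + 1 ≤ i → M.testBit i = false) →
      List.filter (fun p : Int × String => M.testBit p.1.toNat)
        (PySem.List.enumerate (items.drop (n + 1)) ((n : Int) + 1)) = [] := by
    intro M hM
    rw [List.filter_eq_nil_iff]
    intro p hp
    have hcast : ((n : Int) + 1) = ((n + 1 : Nat) : Int) := by push_cast; ring
    rw [hcast] at hp
    have hge : (n + 1 : Nat) ≤ p.1.toNat := enumerate_drop_idx items (n + 1) p hp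
    simp [hM _ hge]
  have hc1 : (2 ^ n + m).testBit (((n : Int), items[n]).1.toNat) = true := by
    simp only [Int.toNat_natCast]
    rw [Nat.testBit_two_pow_add_eq, hmn]
    rfl
  have hc2 : m.testBit (((n : Int), items[n]).1.toNat) = false := by
    simpa using hmn
  unfold maskSub
  rw [key, List.filter_append, List.filter_append, List.map_append, List.map_append,
    List.append_assoc]
  congr 1
  · congr 1
    apply List.filter_congr
    intro p hp
    rw [hbl _ (enumerate_take_idx items n p hp)]
  · rw [List.filter_cons, List.filter_cons, hc1, hc2,
      htail _ (fun i hi => hhigh i (by omega)), htail _ (fun i hi => hmhigh i (by omega))]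
    simp [List.getElem?_eq_getElem hn]

-- one unfolding of B's recursion, valid also when the branches are empty
theorem colex_succ (items : List String) (n kk : Nat) :
    colex items (n + 1) (kk + 1) =
      colex items n (kk + 1) ++ (colex items n kk).map (fun s => s ++ [items.getD n ""]) := by
  rw [colex.eq_def]
  rw [if_neg (by omega : ¬ (kk + 1 = 0))]
  by_cases h : n + 1 < kk + 1
  · rw [if_pos h]
    have h2 : colex items n (kk + 1) = [] := by
      rw [colex.eq_def, if_neg (by omega : ¬ (kk + 1 = 0)), if_pos (by omega : n < kk + 1)]
    have h3 : colex items n kk = [] := by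
      rw [colex.eq_def, if_neg (by omega : ¬ (kk = 0)), if_pos (by omega : n < kk)]
    rw [h2, h3]
    rfl
  · rw [if_neg h]
    simp

-- A's filtered mask scan over [0, 2^n) equals B's recursion
theorem range_filter_colex (items : List String) :
    ∀ n : Nat, n ≤ items.length → ∀ kk : Nat,
    ((List.range (2 ^ n)).filter
        (fun m : Nat => decide ((PySem.Int.bitCount (m : Int) : Int) = ((kk : Nat) : Int)))).map (maskSub items)
      = colex items n kk := by
  intro n
  induction n with
  | zero =>
    intro _ kk
    have h1 : List.range (2 ^ 0) = [0] := rfl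
    have hms0 : maskSub items 0 = [] := by
      unfold maskSub
      simp [Nat.zero_testBit]
    rw [h1]
    cases kk with
    | zero =>
      rw [colex.eq_def, if_pos rfl]
      simp [PySem.Int.bitCount_zero, hms0]
    | succ kk =>
      rw [colex.eq_def, if_neg (by omega : ¬ (kk + 1 = 0)), if_pos (by omega : 0 < kk + 1)]
      simp only [List.filter_cons, List.filter_nil, Nat.cast_zero, PySem.Int.bitCount_zero]
      rw [if_neg (by rw [decide_eq_true_eq]; push_cast; omega :
        ¬ (decide ((0 : Int) = ((kk + 1 : Nat) : Int)) = true))]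
      simp
  | succ n ih =>
    intro hlen kk
    have hlen' : n ≤ items.length := by omega
    have hsp : (2 : Nat) ^ (n + 1) = 2 ^ n + 2 ^ n := by ring
    rw [hsp, List.range_add, List.filter_append, List.filter_map, List.map_append, List.map_map]
    simp only [Function.comp_def]
    have hfc : List.filter
        (fun j : Nat => decide ((PySem.Int.bitCount ((2 ^ n + j : Nat) : Int) : Int) = ((kk : Nat) : Int)))
        (List.range (2 ^ n)) =
        List.filter (fun j : Nat => decide ((PySem.Int.bitCount (j : Int) : Int) + 1 = ((kk : Nat) : Int)))
        (List.range (2 ^ n)) := by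
      apply List.filter_congr
      intro m hm
      have hm' : m < 2 ^ n := List.mem_range.mp hm
      rw [bc_add_pow n m hm', decide_eq_decide]
      push_cast
      omega
    rw [hfc]
    cases kk with
    | zero =>
      have hnil : List.filter (fun j : Nat => decide ((PySem.Int.bitCount (j : Int) : Int) + 1 = (((0 : Nat) : Nat) : Int)))
          (List.range (2 ^ n)) = [] := by
        rw [List.filter_eq_nil_iff]
        intro m _
        simp only [decide_eq_true_eq]
        push_cast
        omega
      rw [hnil]
      simp only [List.map_nil, List.append_nil]
      rw [ih hlen' 0]
      rw [colex.eq_def, if_pos rfl, colex.eq_def, if_pos rfl]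
    | succ kk =>
      have hre : List.filter (fun j : Nat => decide ((PySem.Int.bitCount (j : Int) : Int) + 1 = (((kk + 1 : Nat) : Nat) : Int)))
          (List.range (2 ^ n)) =
          List.filter (fun j : Nat => decide ((PySem.Int.bitCount (j : Int) : Int) = ((kk : Nat) : Int)))
          (List.range (2 ^ n)) := by
        apply List.filter_congr
        intro m _
        rw [decide_eq_decide]
        push_cast
        omega
      rw [hre]
      have hms : List.map (fun j : Nat => maskSub items (2 ^ n + j))
          (List.filter (fun j : Nat => decide ((PySem.Int.bitCount (j : Int) : Int) = ((kk : Nat) : Int)))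
            (List.range (2 ^ n))) =
          List.map (fun s => s ++ [items.getD n ""])
          (List.map (maskSub items)
            (List.filter (fun j : Nat => decide ((PySem.Int.bitCount (j : Int) : Int) = ((kk : Nat) : Int)))
              (List.range (2 ^ n)))) := by
        rw [List.map_map]
        apply List.map_congr_left
        intro m hm
        have hm' : m < 2 ^ n := List.mem_range.mp (List.mem_of_mem_filter hm)
        exact maskSub_add_pow items n m hm' (by omega)
      rw [hms, ih hlen' (kk + 1), ih hlen' kk, colex_succ]

-- ===== VERDICT (by name: the statement is the Claim_ definition above) =====
theorem generate_subsets_of_size_spec : Claim_equal_generate_subsets_of_size := by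
  intro items k _ hpre
  unfold Spec_generate_subsets_of_size generate_subsets_of_size generate_subsets_of_size_alt
  have hpre' : (0 : Int) ≤ k := hpre
  have hk : ¬ k < 0 := Int.not_lt.mpr hpre'
  rw [if_neg hk, if_neg hk]
  have hshift : (1 : Int) <<< items.length = ((2 ^ items.length : Nat) : Int) := by
    simp [Int.shiftLeft_eq]
  rw [hshift, PySem.List.pyRange_zero_nat]
  have hcond : (fun mask : Int => decide ((PySem.Int.bitCount mask : Int) = k)) =
      (fun mask : Int => decide ((PySem.Int.bitCount mask : Int) = ((k.toNat : Nat) : Int))) := by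
    funext mask
    rw [Int.toNat_of_nonneg hpre']
  have h := PySem.List.foldl_append_if
    (fun mask : Int => decide ((PySem.Int.bitCount mask : Int) = k))
    (fun mask : Int => mask_to_subset items mask)
    (List.map (fun j : Nat => (j : Int)) (List.range (2 ^ items.length))) []
  simp only [decide_eq_true_eq] at h
  rw [h, List.nil_append, hcond, List.filter_map, List.map_map]
  simp only [Function.comp_def]
  rw [← range_filter_colex items items.length (le_refl _) k.toNat]
  apply List.map_congr_left
  intro m _
  exact mask_to_subset_natCast items m
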